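-- pv_equiv track=rewrite | github.com/MayankTamakuwala/Vision_Search_Engine | compression/variable_byte.py | vb_decode
-- ===== SOURCE A (Python) =====
-- def vb_decode(encoded_bytes):
--     decoded_value = 0
--
--     for i in range(len(encoded_bytes)):
--         temp = encoded_bytes[i] & 127
--         decoded_value = decoded_value | temp
--         if i != len(encoded_bytes) - 1:
--             decoded_value = decoded_value << 7
--
--     return decoded_value
-- ===== SOURCE B (Python) =====
-- def vb_decode(encoded_bytes):
--     # positional decomposition: byte i (from the end) contributes its low 7 bits at weight 128**i
--     return sum((b & 127) << (7 * i) for i, b in enumerate(reversed(encoded_bytes)))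
-- ===== Notes on version B (the rewrite author's own statement) =====
-- stated objective: alternative
-- what changed: Replaces the forward OR-then-shift-after-each-byte-except-last accumulation by a one-line positional sum over the reversed list, giving each byte's low 7 bits an explicit weight 128**i.
import Mathlib
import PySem

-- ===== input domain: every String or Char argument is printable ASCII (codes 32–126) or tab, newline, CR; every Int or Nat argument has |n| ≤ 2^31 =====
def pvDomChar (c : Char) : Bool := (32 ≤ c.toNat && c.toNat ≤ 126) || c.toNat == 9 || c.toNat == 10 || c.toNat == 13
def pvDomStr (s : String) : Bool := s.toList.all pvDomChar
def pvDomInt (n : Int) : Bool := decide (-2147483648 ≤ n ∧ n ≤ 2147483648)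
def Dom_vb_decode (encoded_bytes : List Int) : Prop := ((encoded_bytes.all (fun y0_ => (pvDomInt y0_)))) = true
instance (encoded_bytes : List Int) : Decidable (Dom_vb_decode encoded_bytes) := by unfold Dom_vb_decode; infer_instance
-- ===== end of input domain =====

-- B replaces A's forward OR-then-shift-after-each-byte-except-last loop by a positional
-- sum over the reversed list (each byte's low 7 bits weighted by 128^i); same O(n) cost.

-- ===== PORT A =====
def vb_decode (encoded_bytes : List Int) : Int :=
  (PySem.List.pyRange 0 (encoded_bytes.length : Int) 1).foldl
    (fun decoded_value i =>
      let temp := PySem.Int.band (PySem.List.pyGetD encoded_bytes i 0) 127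
      let decoded_value := PySem.Int.bor decoded_value temp
      if i ≠ (encoded_bytes.length : Int) - 1 then decoded_value <<< 7
      else decoded_value) 0

-- ===== PORT B =====
-- sum((b & 127) << (7 * i) for i, b in enumerate(reversed(encoded_bytes)))
-- (the shift amount 7*i is a nonnegative enumerate index; .toNat is exact there)
def vb_decode_alt (encoded_bytes : List Int) : Int :=
  ((PySem.List.enumerate encoded_bytes.reverse 0).map
    (fun p => PySem.Int.band p.2 127 <<< (7 * p.1).toNat)).sum

-- ===== PRECONDITION & SPEC =====
def Spec_vb_decode (encoded_bytes : List Int) (out : Int) : Prop := out = vb_decode_alt encoded_bytes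
instance (encoded_bytes : List Int) (out : Int) : Decidable (Spec_vb_decode encoded_bytes out) := by unfold Spec_vb_decode; infer_instance

-- ===== CLAIM (what is proved, stated in full; the proofs are below) =====
def Claim_equal_vb_decode : Prop := ∀ (encoded_bytes : List Int), Dom_vb_decode encoded_bytes → Spec_vb_decode encoded_bytes (vb_decode encoded_bytes)

-- ===== LEMMAS AND PROOFS =====

-- structural reading of A's loop: OR in the byte's low 7 bits, shift unless it is the last byte
def gA : Int → List Int → Int
  | dv, [] => dv
  | dv, [x] => PySem.Int.bor dv (PySem.Int.band x 127)
  | dv, x :: y :: rest => gA (PySem.Int.bor dv (PySem.Int.band x 127) <<< 7) (y :: rest)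

theorem shiftl_cast (a : Int) (n : Nat) : a <<< (n : Int) = a * 2 ^ n := by
  rw [Int.shiftLeft_natCast_right, Int.shiftLeft_eq]

theorem band127_nonneg (x : Int) : 0 ≤ PySem.Int.band x 127 := by
  unfold PySem.Int.band
  split_ifs <;> omega

theorem band127_lt (x : Int) : PySem.Int.band x 127 < 128 := by
  have h1 : x.toNat &&& (127:Int).toNat ≤ (127:Int).toNat := Nat.and_le_right
  have h2 : ((127:Int).toNat - ((127:Int).toNat &&& (-x - 1).toNat)) ≤ (127:Int).toNat :=
    Nat.sub_le _ _
  have h3 : (127:Int).toNat = 127 := rfl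
  unfold PySem.Int.band
  split_ifs <;> omega

-- an OR with disjoint ranges is an addition
theorem bor_eq_add (c b : Int) (hc : 0 ≤ c) (hb0 : 0 ≤ b) (hb : b < 128) :
    PySem.Int.bor (128 * c) b = 128 * c + b := by
  rw [PySem.Int.bor_of_nonneg (by positivity) hb0]
  have h1 : (128 * c).toNat = 2 ^ 7 * c.toNat := by omega
  have h2 : b.toNat < 2 ^ 7 := by omega
  rw [h1, ← Nat.two_pow_add_eq_or_of_lt h2 c.toNat]
  push_cast
  omega

theorem alt_nil : vb_decode_alt [] = 0 := rfl

theorem alt_cons (x : Int) (r : List Int) :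
    vb_decode_alt (x :: r) = vb_decode_alt r + PySem.Int.band x 127 * 128 ^ r.length := by
  unfold vb_decode_alt
  rw [List.reverse_cons, PySem.List.enumerate_append, PySem.List.enumerate_cons,
    PySem.List.enumerate_nil, List.map_append, List.sum_append]
  have h1 : ((7 * (0 + (↑r.reverse.length : Int))).toNat) = 7 * r.length := by
    simp; omega
  simp only [List.map_cons, List.map_nil, List.sum_cons, List.sum_nil, h1]
  have h2 : PySem.Int.band x 127 <<< ((7 * r.length : Nat) : Int)
      = PySem.Int.band x 127 * 128 ^ r.length := by
    rw [shiftl_cast, pow_mul]; norm_num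
  rw [h2]; ring

theorem gA_eq (l : List Int) (hl : l ≠ []) :
    ∀ c : Int, 0 ≤ c → gA (128 * c) l = 128 * c * 128 ^ (l.length - 1) + vb_decode_alt l := by
  induction l with
  | nil => exact absurd rfl hl
  | cons x r ih =>
      intro c hc
      cases r with
      | nil =>
          simp only [gA, bor_eq_add c _ hc (band127_nonneg x) (band127_lt x),
            alt_cons, alt_nil, List.length_nil, List.length_cons]
          ring
      | cons y r' =>
          have ht0 := band127_nonneg x
          simp only [gA]
          rw [bor_eq_add c _ hc ht0 (band127_lt x)]
          rw [show (7 : Int) = ((7 : Nat) : Int) from rfl, shiftl_cast]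
          have hstep : (128 * c + PySem.Int.band x 127) * 2 ^ (7 : Nat)
              = 128 * (128 * c + PySem.Int.band x 127) := by ring
          rw [hstep, ih (by simp) _ (by positivity)]
          rw [alt_cons x (y :: r')]
          simp only [List.length_cons, Nat.add_sub_cancel, pow_succ]
          ring

theorem bridge (m : Nat) : ∀ (xs : List Int) (k : Nat) (dv : Int), xs.length = k + m →
    (PySem.List.pyRange (k : Int) (xs.length : Int) 1).foldl
      (fun decoded_value i =>
        let temp := PySem.Int.band (PySem.List.pyGetD xs i 0) 127
        let decoded_value := PySem.Int.bor decoded_value temp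
        if i ≠ (xs.length : Int) - 1 then decoded_value <<< 7
        else decoded_value) dv = gA dv (xs.drop k) := by
  induction m with
  | zero =>
      intro xs k dv h
      rw [PySem.List.pyRange_one_eq_nil (by omega : (xs.length : Int) ≤ (k : Int))]
      rw [List.drop_eq_nil_of_le (by omega)]
      rfl
  | succ m ih =>
      intro xs k dv h
      have hk : k < xs.length := by omega
      rw [PySem.List.pyRange_one_cons (by exact_mod_cast hk : (k : Int) < (xs.length : Int))]
      rw [List.drop_eq_getElem_cons hk]
      simp only [List.foldl_cons,
        PySem.List.pyGetD_eq_getElem xs (i := (k : Int)) 0 (by positivity)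
          (by exact_mod_cast hk), Int.toNat_natCast]
      cases m with
      | zero =>
          have hcond : ¬ ((k : Int) ≠ (xs.length : Int) - 1) := by omega
          rw [if_neg hcond]
          rw [PySem.List.pyRange_one_eq_nil (by omega : (xs.length : Int) ≤ (k : Int) + 1)]
          rw [List.drop_eq_nil_of_le (by omega)]
          simp [gA]
      | succ m' =>
          have hcond : ((k : Int) ≠ (xs.length : Int) - 1) := by omega
          rw [if_pos hcond]
          have hk1 : k + 1 < xs.length := by omega
          have := ih xs (k + 1)
            ((PySem.Int.bor dv (PySem.Int.band xs[k] 127)) <<< 7) (by omega)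
          push_cast at this
          rw [List.drop_eq_getElem_cons hk1, this]
          simp [gA]

-- ===== VERDICT (by name: the statement is the Claim_ definition above) =====
theorem vb_decode_spec : Claim_equal_vb_decode := by
  intro xs _
  unfold Spec_vb_decode vb_decode
  have h := bridge xs.length xs 0 0 (by omega)
  simp only [Nat.cast_zero, List.drop_zero] at h
  rw [h]
  cases xs with
  | nil => rfl
  | cons x r =>
      have := gA_eq (x :: r) (by simp) 0 le_rfl
      simpa using this
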